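-- pv_equiv track=rewrite | github.com/Frostnova404/Kodingan-SA-Labirin | analisis_perbandingan.py | solve_maze_bruteforce
-- ===== SOURCE A (Python) =====
-- from itertools import product
--
-- def solve_maze_bruteforce(maze):
--     n, m = len(maze), len(maze[0])
--     for path in product((0, 1), repeat=(n + m - 2)):
--         x, y = 0, 0
--         valid_path = True
--         for move in path:
--             if move == 0:
--                 x += 1
--             else:
--                 y += 1
--             if x >= n or y >= m or maze[x][y] == 0:
--                 valid_path = False
--                 break
--         if valid_path:
--             return True
--     return False
-- ===== SOURCE B (Python) =====
-- def solve_maze_bruteforce(maze):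
--     n, m = len(maze), len(maze[0])
--     row = [False] * m
--     row[0] = True
--     for j in range(1, m):
--         row[j] = row[j - 1] and maze[0][j] != 0
--     for i in range(1, n):
--         row[0] = row[0] and maze[i][0] != 0
--         for j in range(1, m):
--             row[j] = (row[j] or row[j - 1]) and maze[i][j] != 0
--     return row[m - 1]
-- ===== Notes on version B (the rewrite author's own statement) =====
-- stated objective: faster
-- what changed: Replaced the exhaustive enumeration of all 2^(n+m-2) move sequences by a single-pass dynamic-programming reachability row (right/down moves), updated row by row.
-- outside the precondition, e.g. on solve_maze_bruteforce([[], []]): A returns True, B raises IndexError; on solve_maze_bruteforce([[1, 1], [1], [1, 1]]): A returns True, B raises IndexError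
import Mathlib
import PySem

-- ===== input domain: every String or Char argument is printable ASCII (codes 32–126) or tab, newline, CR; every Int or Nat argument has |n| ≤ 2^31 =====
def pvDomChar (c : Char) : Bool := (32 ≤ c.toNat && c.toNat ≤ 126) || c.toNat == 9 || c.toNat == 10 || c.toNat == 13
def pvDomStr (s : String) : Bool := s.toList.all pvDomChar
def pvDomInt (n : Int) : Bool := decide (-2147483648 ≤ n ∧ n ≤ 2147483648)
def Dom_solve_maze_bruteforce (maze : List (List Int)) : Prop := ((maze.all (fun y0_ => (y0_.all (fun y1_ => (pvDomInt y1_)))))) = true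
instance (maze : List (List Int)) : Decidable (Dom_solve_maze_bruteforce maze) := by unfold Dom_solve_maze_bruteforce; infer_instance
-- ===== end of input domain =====

-- B replaces A's enumeration of all 2^(n+m-2) move sequences by an O(n*m) row-by-row
-- dynamic-programming reachability computation (objective: faster, asymptotic).

-- ===== PORT A =====
-- product((0,1), repeat=k), in Python's tuple order (first coordinate varies slowest)
def pvAllPaths : Nat → List (List Int)
  | 0 => [[]]
  | k + 1 => (pvAllPaths k).map (fun p => (0 : Int) :: p) ++ (pvAllPaths k).map (fun p => (1 : Int) :: p)

-- the inner `for move in path` loop with its break; List.getD is exact here because the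
-- accesses are guarded by x' < n, y' < m and Pre_ guarantees rows of length ≥ m
def pvGo (maze : List (List Int)) (n m : Nat) (x y : Nat) : List Int → Bool
  | [] => true
  | mv :: rest =>
    let x' := if mv == 0 then x + 1 else x
    let y' := if mv == 0 then y else y + 1
    if n ≤ x' ∨ m ≤ y' ∨ (maze.getD x' []).getD y' 0 == 0 then false
    else pvGo maze n m x' y' rest

-- A's early `return True` on the first valid path is `List.any`
def solve_maze_bruteforce (maze : List (List Int)) : Bool :=
  let n := maze.length
  let m := (maze.headD []).length
  (pvAllPaths (n + m - 2)).any (fun p => pvGo maze n m 0 0 p)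

-- ===== PORT B =====
-- first row of Source B:  row[j] = row[j-1] and maze[0][j] != 0   (cs = tail of row 0)
def altFirstRowAux (prev : Bool) : List Int → List Bool
  | [] => []
  | c :: cs => let cur := prev && !(c == 0); cur :: altFirstRowAux cur cs

-- inner loop of Source B:  row[j] = (row[j] or row[j-1]) and maze[i][j] != 0
def altStepAux (left : Bool) : List Int → List Bool → List Bool
  | _, [] => []
  | [], _ :: _ => []          -- unreachable under Pre_ (rows have length ≥ m)
  | c :: cs, o :: os => let cur := (o || left) && !(c == 0); cur :: altStepAux cur cs os

-- one iteration of the outer `for i in range(1, n)` loop (head: row[0] = row[0] and maze[i][0] != 0)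
def altStepRow (cells : List Int) (old : List Bool) : List Bool :=
  match cells, old with
  | c :: cs, o :: os => let h := o && !(c == 0); h :: altStepAux h cs os
  | _, _ => []

def solve_maze_bruteforce_alt (maze : List (List Int)) : Bool :=
  match maze with
  | [] => false                -- Source B raises IndexError here; excluded by Pre_
  | r0 :: rest =>
    let row0 := match r0 with
      | [] => []               -- Source B raises IndexError here (m = 0); excluded by Pre_
      | _ :: cs => true :: altFirstRowAux true cs
    let final := rest.foldl (fun row cells => altStepRow cells row) row0
    final.getLastD false       -- return row[m-1]

-- ===== PRECONDITION & SPEC =====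
-- Pre_ excludes empty and zero-width mazes and mazes whose later rows are shorter than the
-- first row: on those A raises IndexError/ValueError or returns a value that depends
-- accidentally on which cells the enumeration happens to touch, while B's grid indexing raises.
def Pre_solve_maze_bruteforce (maze : List (List Int)) : Prop :=
  0 < maze.length ∧ 0 < (maze.headD []).length ∧
    ∀ r ∈ maze, (maze.headD []).length ≤ r.length
instance (maze : List (List Int)) : Decidable (Pre_solve_maze_bruteforce maze) := by
  unfold Pre_solve_maze_bruteforce; infer_instance

def pvWitness_solve_maze_bruteforce : List (List Int) := [[1, 1], [0, 1]]

def Spec_solve_maze_bruteforce (maze : List (List Int)) (out : Bool) : Prop := out = solve_maze_bruteforce_alt maze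
instance (maze : List (List Int)) (out : Bool) : Decidable (Spec_solve_maze_bruteforce maze out) := by unfold Spec_solve_maze_bruteforce; infer_instance

-- ===== CLAIM (what is proved, stated in full; the proofs are below) =====
def Claim_equal_solve_maze_bruteforce : Prop := ∀ (maze : List (List Int)), Dom_solve_maze_bruteforce maze → Pre_solve_maze_bruteforce maze → Spec_solve_maze_bruteforce maze (solve_maze_bruteforce maze)

-- ===== LEMMAS AND PROOFS =====

-- cell (i,j) is in bounds and nonzero
def pvCellNZ (maze : List (List Int)) (i j : Nat) : Prop :=
  i < maze.length ∧ j < (maze.headD []).length ∧ (maze.getD i []).getD j 0 ≠ 0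

-- (i,j) reachable from (0,0) by down/right moves through nonzero cells (the start cell is
-- never inspected, exactly as in both programs)
inductive pvReach (maze : List (List Int)) : Nat → Nat → Prop
  | start : pvReach maze 0 0
  | down (i j : Nat) : pvReach maze i j → pvCellNZ maze (i + 1) j → pvReach maze (i + 1) j
  | right (i j : Nat) : pvReach maze i j → pvCellNZ maze i (j + 1) → pvReach maze i (j + 1)

def pvDowns (p : List Int) : Nat := (p.filter (fun mv => mv == 0)).length
def pvRights (p : List Int) : Nat := (p.filter (fun mv => !(mv == 0))).length

lemma pvDowns_add_pvRights (p : List Int) : pvDowns p + pvRights p = p.length :=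
  (List.length_eq_length_filter_add (fun mv => mv == 0)).symm

lemma pvGo_cons (maze : List (List Int)) (n m x y : Nat) (mv : Int) (rest : List Int) :
    pvGo maze n m x y (mv :: rest) =
      (if (mv == 0) = true then
        (if n ≤ x + 1 ∨ m ≤ y ∨ ((maze.getD (x + 1) []).getD y 0 == 0) = true then false
         else pvGo maze n m (x + 1) y rest)
      else
        (if n ≤ x ∨ m ≤ y + 1 ∨ ((maze.getD x []).getD (y + 1) 0 == 0) = true then false
         else pvGo maze n m x (y + 1) rest)) := by
  simp only [pvGo]
  by_cases h : (mv == 0) = true <;> simp [h]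

lemma pvGo_append (maze : List (List Int)) (n m : Nat) :
    ∀ (p q : List Int) (x y : Nat),
      pvGo maze n m x y (p ++ q)
        = (pvGo maze n m x y p && pvGo maze n m (x + pvDowns p) (y + pvRights p) q) := by
  intro p
  induction p with
  | nil => intro q x y; simp [pvGo, pvDowns, pvRights]
  | cons mv rest ih =>
    intro q x y
    rw [List.cons_append, pvGo_cons, pvGo_cons]
    by_cases h : (mv == 0) = true
    · have h1 : pvDowns (mv :: rest) = pvDowns rest + 1 := by simp [pvDowns, h]
      have h2 : pvRights (mv :: rest) = pvRights rest := by simp [pvRights, h]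
      rw [if_pos h, if_pos h]
      split
      · rfl
      · rw [ih, h1, h2]
        have e1 : x + 1 + pvDowns rest = x + (pvDowns rest + 1) := by omega
        rw [e1]
    · have h1 : pvDowns (mv :: rest) = pvDowns rest := by simp [pvDowns, h]
      have h2 : pvRights (mv :: rest) = pvRights rest + 1 := by simp [pvRights, h]
      rw [if_neg h, if_neg h]
      split
      · rfl
      · rw [ih, h1, h2]
        have e2 : y + 1 + pvRights rest = y + (pvRights rest + 1) := by omega
        rw [e2]

lemma pvGo_sound (maze : List (List Int)) :
    ∀ (p : List Int) (x y : Nat),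
      x < maze.length → y < (maze.headD []).length → pvReach maze x y →
      pvGo maze maze.length (maze.headD []).length x y p = true →
      ∃ a b, pvReach maze a b ∧ a < maze.length ∧ b < (maze.headD []).length ∧
        a + b = x + y + p.length := by
  intro p
  induction p with
  | nil => intro x y hx hy hr _; exact ⟨x, y, hr, hx, hy, by simp⟩
  | cons mv rest ih =>
    intro x y hx hy hr hgo
    rw [pvGo_cons] at hgo
    by_cases h : (mv == 0) = true
    · rw [if_pos h] at hgo
      by_cases hC : maze.length ≤ x + 1 ∨ (maze.headD []).length ≤ y ∨
          ((maze.getD (x + 1) []).getD y 0 == 0) = true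
      · rw [if_pos hC] at hgo; exact absurd hgo (by simp)
      · rw [if_neg hC] at hgo
        rw [not_or, not_or] at hC
        obtain ⟨h1, h2, h3⟩ := hC
        have h3' : (maze.getD (x + 1) []).getD y 0 ≠ 0 := fun he => h3 (by rw [he]; decide)
        have hr' : pvReach maze (x + 1) y :=
          .down x y hr ⟨by omega, by omega, h3'⟩
        obtain ⟨a, b, ha, hb, hc, hd⟩ := ih (x + 1) y (by omega) (by omega) hr' hgo
        exact ⟨a, b, ha, hb, hc, by simp only [List.length_cons]; omega⟩
    · rw [if_neg h] at hgo
      by_cases hC : maze.length ≤ x ∨ (maze.headD []).length ≤ y + 1 ∨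
          ((maze.getD x []).getD (y + 1) 0 == 0) = true
      · rw [if_pos hC] at hgo; exact absurd hgo (by simp)
      · rw [if_neg hC] at hgo
        rw [not_or, not_or] at hC
        obtain ⟨h1, h2, h3⟩ := hC
        have h3' : (maze.getD x []).getD (y + 1) 0 ≠ 0 := fun he => h3 (by rw [he]; decide)
        have hr' : pvReach maze x (y + 1) :=
          .right x y hr ⟨by omega, by omega, h3'⟩
        obtain ⟨a, b, ha, hb, hc, hd⟩ := ih x (y + 1) (by omega) (by omega) hr' hgo
        exact ⟨a, b, ha, hb, hc, by simp only [List.length_cons]; omega⟩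

lemma pvReach_complete (maze : List (List Int)) (a b : Nat) (h : pvReach maze a b) :
    ∃ p : List Int, (∀ mv ∈ p, mv = 0 ∨ mv = 1) ∧ pvDowns p = a ∧ pvRights p = b ∧
      pvGo maze maze.length (maze.headD []).length 0 0 p = true := by
  induction h with
  | start => exact ⟨[], by simp, by simp [pvDowns], by simp [pvRights], rfl⟩
  | down i j _ hcell ih =>
    obtain ⟨p, hmem, hd, hr, hgo⟩ := ih
    obtain ⟨h1, h2, h3⟩ := hcell
    refine ⟨p ++ [0], ?_, ?_, ?_, ?_⟩
    · intro mv hmv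
      rcases List.mem_append.1 hmv with hmv | hmv
      · exact hmem mv hmv
      · left; simpa using hmv
    · simp [pvDowns, List.filter_append] at hd ⊢; omega
    · simp [pvRights, List.filter_append] at hr ⊢; omega
    · rw [pvGo_append, hgo, hd, hr]
      simp only [Bool.true_and, Nat.zero_add]
      rw [pvGo_cons, if_pos (by decide), if_neg]
      · rfl
      · rw [not_or, not_or]
        exact ⟨by omega, by omega, fun he => h3 (by simpa using he)⟩
  | right i j _ hcell ih =>
    obtain ⟨p, hmem, hd, hr, hgo⟩ := ih
    obtain ⟨h1, h2, h3⟩ := hcell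
    refine ⟨p ++ [1], ?_, ?_, ?_, ?_⟩
    · intro mv hmv
      rcases List.mem_append.1 hmv with hmv | hmv
      · exact hmem mv hmv
      · right; simpa using hmv
    · simp [pvDowns, List.filter_append] at hd ⊢; omega
    · simp [pvRights, List.filter_append] at hr ⊢; omega
    · rw [pvGo_append, hgo, hd, hr]
      simp only [Bool.true_and, Nat.zero_add]
      rw [pvGo_cons, if_neg (by decide), if_neg]
      · rfl
      · rw [not_or, not_or]
        exact ⟨by omega, by omega, fun he => h3 (by simpa using he)⟩

lemma pvAllPaths_length {k : Nat} {p : List Int} (h : p ∈ pvAllPaths k) : p.length = k := by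
  induction k generalizing p with
  | zero => simp [pvAllPaths] at h; simp [h]
  | succ k ih =>
    simp only [pvAllPaths, List.mem_append, List.mem_map] at h
    rcases h with ⟨q, hq, rfl⟩ | ⟨q, hq, rfl⟩ <;> simp [ih hq]

lemma mem_pvAllPaths {p : List Int} (h01 : ∀ mv ∈ p, mv = 0 ∨ mv = 1) :
    p ∈ pvAllPaths p.length := by
  induction p with
  | nil => simp [pvAllPaths]
  | cons mv rest ih =>
    have hrest := ih (fun x hx => h01 x (List.mem_cons_of_mem _ hx))
    simp only [List.length_cons, pvAllPaths, List.mem_append, List.mem_map]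
    rcases h01 mv (List.mem_cons_self) with rfl | rfl
    · exact Or.inl ⟨rest, hrest, rfl⟩
    · exact Or.inr ⟨rest, hrest, rfl⟩

lemma portA_iff (maze : List (List Int)) (hpre : Pre_solve_maze_bruteforce maze) :
    solve_maze_bruteforce maze = true ↔
      pvReach maze (maze.length - 1) ((maze.headD []).length - 1) := by
  obtain ⟨hn, hm, _⟩ := hpre
  constructor
  · intro h
    simp only [solve_maze_bruteforce, List.any_eq_true] at h
    obtain ⟨p, hp, hgo⟩ := h
    have hlen := pvAllPaths_length hp
    obtain ⟨a, b, hr, ha, hb, hab⟩ := pvGo_sound maze p 0 0 hn hm .start hgo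
    have hae : a = maze.length - 1 := by omega
    have hbe : b = (maze.headD []).length - 1 := by omega
    rw [hae, hbe] at hr
    exact hr
  · intro h
    obtain ⟨p, h01, hd, hr, hgo⟩ := pvReach_complete maze _ _ h
    simp only [solve_maze_bruteforce, List.any_eq_true]
    refine ⟨p, ?_, hgo⟩
    have hsum := pvDowns_add_pvRights p
    have hlen : p.length = maze.length + (maze.headD []).length - 2 := by omega
    exact hlen ▸ mem_pvAllPaths h01

-- ----- B side -----

lemma pvGetD_zero (maze : List (List Int)) : maze.getD 0 [] = maze.headD [] := by
  cases maze <;> rfl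

lemma pvReach_zero_succ (maze : List (List Int)) (j : Nat) :
    pvReach maze 0 (j + 1) ↔ pvReach maze 0 j ∧ pvCellNZ maze 0 (j + 1) := by
  constructor
  · intro h
    cases h with
    | right i j h hc => exact ⟨h, hc⟩
  · rintro ⟨h, hc⟩; exact .right _ _ h hc

lemma pvReach_succ_zero (maze : List (List Int)) (i : Nat) :
    pvReach maze (i + 1) 0 ↔ pvReach maze i 0 ∧ pvCellNZ maze (i + 1) 0 := by
  constructor
  · intro h
    cases h with
    | down i j h hc => exact ⟨h, hc⟩
  · rintro ⟨h, hc⟩; exact .down _ _ h hc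

lemma pvReach_succ_succ (maze : List (List Int)) (i j : Nat) :
    pvReach maze (i + 1) (j + 1) ↔
      (pvReach maze i (j + 1) ∨ pvReach maze (i + 1) j) ∧ pvCellNZ maze (i + 1) (j + 1) := by
  constructor
  · intro h
    cases h with
    | down i j h hc => exact ⟨Or.inl h, hc⟩
    | right i j h hc => exact ⟨Or.inr h, hc⟩
  · rintro ⟨h | h, hc⟩
    · exact .down _ _ h hc
    · exact .right _ _ h hc

lemma altFirstRowAux_spec (maze : List (List Int)) :
    ∀ (cs : List Int) (prev : Bool) (t : Nat),
      0 < maze.length →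
      cs = (maze.headD []).drop (t + 1) →
      (prev = true ↔ pvReach maze 0 t) →
      ∀ j, j < cs.length →
        ((altFirstRowAux prev cs).getD j false = true ↔ pvReach maze 0 (t + 1 + j)) := by
  intro cs
  induction cs with
  | nil => intro prev t _ _ _ j hj; simp at hj
  | cons c cs' ih =>
    intro prev t hn hdrop hprev j hj
    have hc : (maze.headD [])[t + 1]? = some c := by
      have : ((maze.headD []).drop (t + 1))[0]? = (maze.headD [])[t + 1]? := by
        rw [List.getElem?_drop]
      rw [← this, ← hdrop]
      rfl
    have htlt : t + 1 < (maze.headD []).length := by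
      have := List.getElem?_eq_some_iff.1 hc
      exact this.1
    have hcellval : (maze.getD 0 []).getD (t + 1) 0 = c := by
      rw [pvGetD_zero, List.getD_eq_getElem?_getD, hc]; rfl
    have hreach : pvReach maze 0 (t + 1) ↔ (prev = true ∧ c ≠ 0) := by
      rw [pvReach_zero_succ, ← hprev]
      unfold pvCellNZ
      rw [hcellval]
      constructor
      · rintro ⟨h1, _, _, h2⟩; exact ⟨h1, h2⟩
      · rintro ⟨h1, h2⟩; exact ⟨h1, hn, htlt, h2⟩
    cases j with
    | zero =>
      simp only [altFirstRowAux, List.getD_cons_zero, Nat.add_zero]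
      rw [hreach]
      simp [Bool.and_eq_true]
    | succ j' =>
      have hdrop' : cs' = (maze.headD []).drop (t + 1 + 1) := by
        have : (maze.headD []).drop (t + 1 + 1) = ((maze.headD []).drop (t + 1)).drop 1 := by
          rw [List.drop_drop]
        rw [this, ← hdrop]
        rfl
      have hprev' : ((prev && !(c == 0)) = true ↔ pvReach maze 0 (t + 1)) := by
        rw [hreach]; simp [Bool.and_eq_true]
      have := ih (prev && !(c == 0)) (t + 1) hn hdrop' hprev' j' (by simpa using Nat.lt_of_succ_lt_succ hj)
      simp only [altFirstRowAux, List.getD_cons_succ]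
      have he : t + 1 + (j' + 1) = t + 1 + 1 + j' := by omega
      rw [he]
      exact this

lemma altStepAux_length :
    ∀ (os : List Bool) (cs : List Int) (left : Bool), os.length ≤ cs.length →
      (altStepAux left cs os).length = os.length := by
  intro os
  induction os with
  | nil => intro cs left _; cases cs <;> rfl
  | cons o os' ih =>
    intro cs left hlen
    cases cs with
    | nil => simp at hlen
    | cons c cs' =>
      simp only [altStepAux, List.length_cons]
      rw [ih cs' _ (by simpa using hlen)]

lemma altStepAux_spec (maze : List (List Int)) (i : Nat) (hi : i + 1 < maze.length) :
    ∀ (os : List Bool) (cs : List Int) (left : Bool) (t : Nat),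
      cs = (maze.getD (i + 1) []).drop (t + 1) →
      os.length ≤ cs.length →
      t + 1 + os.length ≤ (maze.headD []).length →
      (∀ q, q < os.length → (os.getD q false = true ↔ pvReach maze i (t + 1 + q))) →
      (left = true ↔ pvReach maze (i + 1) t) →
      ∀ j, j < os.length →
        ((altStepAux left cs os).getD j false = true ↔ pvReach maze (i + 1) (t + 1 + j)) := by
  intro os
  induction os with
  | nil => intro cs left t _ _ _ _ _ j hj; simp at hj
  | cons o os' ih =>
    intro cs left t hdrop hlen hm hos hleft j hj
    cases cs with
    | nil => simp at hlen
    | cons c cs' =>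
      have hc : (maze.getD (i + 1) [])[t + 1]? = some c := by
        have : ((maze.getD (i + 1) []).drop (t + 1))[0]? = (maze.getD (i + 1) [])[t + 1]? := by
          rw [List.getElem?_drop]
        rw [← this, ← hdrop]
        rfl
      have hcellval : (maze.getD (i + 1) []).getD (t + 1) 0 = c := by
        rw [List.getD_eq_getElem?_getD, hc]; rfl
      have hreach : pvReach maze (i + 1) (t + 1) ↔
          ((o = true ∨ left = true) ∧ c ≠ 0) := by
        rw [pvReach_succ_succ, ← hleft, ← hos 0 (by simp)]
        unfold pvCellNZ
        rw [hcellval]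
        simp only [List.getD_cons_zero]
        constructor
        · rintro ⟨h1, _, _, h2⟩; exact ⟨h1, h2⟩
        · rintro ⟨h1, h2⟩
          exact ⟨h1, hi, by simp only [List.length_cons] at hm; omega, h2⟩
      cases j with
      | zero =>
        simp only [altStepAux, List.getD_cons_zero, Nat.add_zero]
        rw [hreach]
        simp [Bool.and_eq_true, Bool.or_eq_true]
      | succ j' =>
        have hdrop' : cs' = (maze.getD (i + 1) []).drop (t + 1 + 1) := by
          have : (maze.getD (i + 1) []).drop (t + 1 + 1)
              = ((maze.getD (i + 1) []).drop (t + 1)).drop 1 := by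
            rw [List.drop_drop]
          rw [this, ← hdrop]
          rfl
        have hos' : ∀ q, q < os'.length → (os'.getD q false = true ↔ pvReach maze i (t + 1 + 1 + q)) := by
          intro q hq
          have := hos (q + 1) (by simpa using Nat.succ_lt_succ hq)
          simpa [List.getD_cons_succ, show t + 1 + (q + 1) = t + 1 + 1 + q by omega] using this
        have hleft' : (((o || left) && !(c == 0)) = true ↔ pvReach maze (i + 1) (t + 1)) := by
          rw [hreach]; simp [Bool.and_eq_true, Bool.or_eq_true]
        have := ih cs' ((o || left) && !(c == 0)) (t + 1) hdrop'
          (by simpa using hlen) (by simp only [List.length_cons] at hm; omega) hos' hleft'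
          j' (by simpa using Nat.lt_of_succ_lt_succ hj)
        simp only [altStepAux, List.getD_cons_succ]
        have he : t + 1 + (j' + 1) = t + 1 + 1 + j' := by omega
        rw [he]
        exact this

lemma altStepRow_spec (maze : List (List Int)) (i : Nat) (hi : i + 1 < maze.length)
    (cells : List Int) (hcells : cells = maze.getD (i + 1) [])
    (hclen : (maze.headD []).length ≤ cells.length)
    (old : List Bool) (holdlen : old.length = (maze.headD []).length)
    (hm : 0 < (maze.headD []).length)
    (hold : ∀ j, j < (maze.headD []).length → (old.getD j false = true ↔ pvReach maze i j)) :
    (altStepRow cells old).length = (maze.headD []).length ∧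
      ∀ j, j < (maze.headD []).length →
        ((altStepRow cells old).getD j false = true ↔ pvReach maze (i + 1) j) := by
  cases old with
  | nil => exact absurd hm (by simp only [List.length_nil] at holdlen; omega)
  | cons o os =>
    cases cells with
    | nil => exact absurd hm (by simp only [List.length_nil] at hclen; omega)
    | cons c cs =>
      have hcellval : (maze.getD (i + 1) []).getD 0 0 = c := by rw [← hcells]; rfl
      have hhead : ((o && !(c == 0)) = true ↔ pvReach maze (i + 1) 0) := by
        rw [pvReach_succ_zero, ← hold 0 hm]
        unfold pvCellNZ
        rw [hcellval]
        simp only [List.getD_cons_zero]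
        constructor
        · simp only [Bool.and_eq_true, Bool.not_eq_eq_eq_not, Bool.not_true, beq_eq_false_iff_ne,
            ne_eq]
          rintro ⟨h1, h2⟩; exact ⟨h1, hi, hm, h2⟩
        · rintro ⟨h1, _, _, h2⟩
          simp [h1, h2]
      have hdrop : cs = (maze.getD (i + 1) []).drop (0 + 1) := by
        rw [← hcells]; rfl
      have hlen' : os.length ≤ cs.length := by
        simp only [List.length_cons] at hclen holdlen; omega
      have hmlen : 0 + 1 + os.length ≤ (maze.headD []).length := by
        simp only [List.length_cons] at holdlen; omega
      have hos : ∀ q, q < os.length → (os.getD q false = true ↔ pvReach maze i (0 + 1 + q)) := by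
        intro q hq
        have := hold (q + 1) (by simp only [List.length_cons] at holdlen; omega)
        simpa [List.getD_cons_succ, show 0 + 1 + q = q + 1 by omega] using this
      have haux := altStepAux_spec maze i hi os cs (o && !(c == 0)) 0 hdrop hlen' hmlen hos hhead
      constructor
      · simp only [altStepRow, List.length_cons]
        rw [altStepAux_length os cs _ hlen']
        simp only [List.length_cons] at holdlen; omega
      · intro j hj
        cases j with
        | zero => simpa [altStepRow] using hhead
        | succ j' =>
          have hj' : j' < os.length := by simp only [List.length_cons] at holdlen; omega
          have := haux j' hj'
          simpa [altStepRow, List.getD_cons_succ, show 0 + 1 + j' = j' + 1 by omega] using this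

lemma altFold_spec (maze : List (List Int))
    (hrows : ∀ r ∈ maze, (maze.headD []).length ≤ r.length)
    (hm : 0 < (maze.headD []).length) :
    ∀ (rows : List (List Int)) (i : Nat) (R : List Bool),
      rows = maze.drop (i + 1) →
      R.length = (maze.headD []).length →
      (∀ j, j < (maze.headD []).length → (R.getD j false = true ↔ pvReach maze i j)) →
      (rows.foldl (fun row cells => altStepRow cells row) R).length = (maze.headD []).length ∧
        ∀ j, j < (maze.headD []).length →
          ((rows.foldl (fun row cells => altStepRow cells row) R).getD j false = true ↔
            pvReach maze (i + rows.length) j) := by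
  intro rows
  induction rows with
  | nil =>
    intro i R _ hRlen hR
    exact ⟨hRlen, by simpa using hR⟩
  | cons cells rows' ih =>
    intro i R hdrop hRlen hR
    have hc : maze[i + 1]? = some cells := by
      have : (maze.drop (i + 1))[0]? = maze[i + 1]? := by rw [List.getElem?_drop]
      rw [← this, ← hdrop]
      rfl
    have hi : i + 1 < maze.length := (List.getElem?_eq_some_iff.1 hc).1
    have hcells : cells = maze.getD (i + 1) [] := by
      rw [List.getD_eq_getElem?_getD, hc]; rfl
    have hmem : cells ∈ maze := by
      have := List.getElem?_eq_some_iff.1 hc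
      obtain ⟨hlt, he⟩ := this
      exact he ▸ List.getElem_mem hlt
    have hstep := altStepRow_spec maze i hi cells hcells (hrows cells hmem) R hRlen hm hR
    have hdrop' : rows' = maze.drop (i + 1 + 1) := by
      have : maze.drop (i + 1 + 1) = (maze.drop (i + 1)).drop 1 := by rw [List.drop_drop]
      rw [this, ← hdrop]
      rfl
    have := ih (i + 1) (altStepRow cells R) hdrop' hstep.1 hstep.2
    simp only [List.foldl_cons, List.length_cons]
    have he : i + 1 + rows'.length = i + (rows'.length + 1) := by omega
    rw [← he]
    exact this

lemma portB_iff (maze : List (List Int)) (hpre : Pre_solve_maze_bruteforce maze) :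
    solve_maze_bruteforce_alt maze = true ↔
      pvReach maze (maze.length - 1) ((maze.headD []).length - 1) := by
  obtain ⟨hn, hm, hrows⟩ := hpre
  cases maze with
  | nil => simp at hn
  | cons r0 rest =>
    cases r0 with
    | nil => simp at hm
    | cons c0 cs =>
      set maze := (c0 :: cs) :: rest with hmaze
      have hhead : maze.headD [] = c0 :: cs := rfl
      have hrow0len : (true :: altFirstRowAux true cs).length = (maze.headD []).length := by
        have : ∀ (prev : Bool) (l : List Int), (altFirstRowAux prev l).length = l.length := by
          intro prev l
          induction l generalizing prev with
          | nil => rfl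
          | cons a l ih => simp only [altFirstRowAux, List.length_cons]; rw [ih]
        rw [hhead]
        simp only [List.length_cons, this]
      have hrow0 : ∀ j, j < (maze.headD []).length →
          ((true :: altFirstRowAux true cs).getD j false = true ↔ pvReach maze 0 j) := by
        intro j hj
        cases j with
        | zero => simpa using pvReach.start
        | succ j' =>
          have hdrop : cs = (maze.headD []).drop (0 + 1) := by rw [hhead]; rfl
          have hj' : j' < cs.length := by
            rw [hhead] at hj; simpa using Nat.lt_of_succ_lt_succ hj
          have := altFirstRowAux_spec maze cs true 0 hn hdrop
            (by simpa using pvReach.start) j' hj'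
          simpa [List.getD_cons_succ, show 0 + 1 + j' = j' + 1 by omega] using this
      have hfold := altFold_spec maze hrows hm rest 0 (true :: altFirstRowAux true cs)
        rfl hrow0len hrow0
      have hrestlen : rest.length = maze.length - 1 := by simp [hmaze]
      obtain ⟨hflen, hfspec⟩ := hfold
      have hfin := hfspec ((maze.headD []).length - 1) (by omega)
      rw [hrestlen] at hfin
      have hnsub : 0 + (maze.length - 1) = maze.length - 1 := by omega
      rw [hnsub] at hfin
      have hlast : (rest.foldl (fun row cells => altStepRow cells row)
            (true :: altFirstRowAux true cs)).getLastD false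
          = (rest.foldl (fun row cells => altStepRow cells row)
            (true :: altFirstRowAux true cs)).getD ((maze.headD []).length - 1) false := by
        rw [List.getLastD_eq_getLast?, List.getLast?_eq_getElem?, List.getD_eq_getElem?_getD, hflen]
      show (rest.foldl (fun row cells => altStepRow cells row)
          (true :: altFirstRowAux true cs)).getLastD false = true ↔ _
      rw [hlast]
      exact hfin

-- ===== VERDICT (by name: the statement is the Claim_ definition above) =====
theorem solve_maze_bruteforce_spec : Claim_equal_solve_maze_bruteforce := by
  intro maze _ hpre
  unfold Spec_solve_maze_bruteforce
  rw [Bool.eq_iff_iff, portA_iff maze hpre, portB_iff maze hpre]
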